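-- pv_equiv track=rewrite | github.com/gabimolocea/compare-camera | backend/apps/comparisons/services/compare_cameras.py | _best_indices
-- ===== SOURCE A (Python) =====
-- def _best_indices(values: list, direction: str) -> list[int]:
--     """Return the indices of the best camera(s) for a field. Returns [] if all None or direction=none."""
--     if direction == "none":
--         return []
--     non_none = [(i, v) for i, v in enumerate(values) if v is not None]
--     if not non_none:
--         return []
--     if direction == "boolean":
--         winners = [i for i, v in non_none if v]
--         return winners if winners else []
--     if direction == "higher":
--         best_val = max(v for _, v in non_none)
--         return [i for i, v in non_none if v == best_val]
--     if direction == "lower":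
--         best_val = min(v for _, v in non_none)
--         return [i for i, v in non_none if v == best_val]
--     return []
-- ===== SOURCE B (Python) =====
-- def _best_indices(values: list, direction: str) -> list[int]:
--     """Single accumulating pass: no intermediate non_none list, no extremum pre-pass."""
--     if direction == "none":
--         return []
--     if direction == "boolean":
--         winners = []
--         for i, v in enumerate(values):
--             if v is not None and v:
--                 winners.append(i)
--         return winners
--     if direction not in ("higher", "lower"):
--         return []
--     best = None
--     winners = []
--     for i, v in enumerate(values):
--         if v is None:
--             continue
--         if best is None or (v > best if direction == "higher" else v < best):
--             best = v
--             winners = [i]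
--         elif v == best:
--             winners.append(i)
--     return winners
-- ===== Notes on version B (the rewrite author's own statement) =====
-- stated objective: simpler
-- what changed: Replaces the build-non_none-list plus extremum-then-filter two passes with one accumulating traversal that keeps a running best value and winners list (reset on strictly better, append on tie).
import Mathlib
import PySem

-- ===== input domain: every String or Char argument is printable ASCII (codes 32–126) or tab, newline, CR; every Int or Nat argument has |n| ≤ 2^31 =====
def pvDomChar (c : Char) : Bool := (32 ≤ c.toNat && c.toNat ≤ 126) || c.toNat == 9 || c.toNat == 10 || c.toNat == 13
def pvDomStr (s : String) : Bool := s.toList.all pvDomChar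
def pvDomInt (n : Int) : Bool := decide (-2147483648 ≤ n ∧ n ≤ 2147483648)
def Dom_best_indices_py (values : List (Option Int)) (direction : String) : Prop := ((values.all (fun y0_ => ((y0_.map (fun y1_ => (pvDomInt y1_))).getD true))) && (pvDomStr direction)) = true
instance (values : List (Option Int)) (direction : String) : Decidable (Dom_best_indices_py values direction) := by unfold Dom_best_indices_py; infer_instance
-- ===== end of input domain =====

-- B replaces A's non_none list plus extremum-then-filter passes by one accumulating
-- traversal with a running best and winners list; same return value everywhere (simpler, not faster).

-- ===== PORT A =====
-- A: build non_none, early [] if empty, then per-direction comprehension / max+filter / min+filter.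
def best_indices_py (values : List (Option Int)) (direction : String) : List Int :=
  if direction == "none" then []
  else
    let nonNone := (PySem.List.enumerate values).filterMap (fun p => p.2.map (fun x => (p.1, x)))
    if nonNone.isEmpty then []
    else if direction == "boolean" then
      (nonNone.filter (fun p => p.2 != 0)).map (fun p => p.1)
    else if direction == "higher" then
      match PySem.List.max? (nonNone.map (fun p => p.2)) (fun y => y) with
      | some bestVal => (nonNone.filter (fun p => p.2 == bestVal)).map (fun p => p.1)
      | none => []
    else if direction == "lower" then
      match PySem.List.min? (nonNone.map (fun p => p.2)) (fun y => y) with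
      | some bestVal => (nonNone.filter (fun p => p.2 == bestVal)).map (fun p => p.1)
      | none => []
    else []

-- ===== PORT B =====
-- Source B's boolean loop: append truthy indices as we go.
def pvBoolLoop : List (Int × Option Int) → List Int → List Int
  | [], acc => acc
  | (i, v) :: rest, acc =>
    match v with
    | none => pvBoolLoop rest acc
    | some x => if x != 0 then pvBoolLoop rest (acc ++ [i]) else pvBoolLoop rest acc

-- Source B's higher/lower loop: running best (None until a value is seen) and winners list.
def pvBestLoop (gt : Int → Int → Bool) : List (Int × Option Int) → Option Int → List Int → List Int
  | [], _, w => w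
  | (i, v) :: rest, best, w =>
    match v with
    | none => pvBestLoop gt rest best w
    | some x =>
      match best with
      | none => pvBestLoop gt rest (some x) [i]
      | some b =>
        if gt x b then pvBestLoop gt rest (some x) [i]
        else if x == b then pvBestLoop gt rest (some b) (w ++ [i])
        else pvBestLoop gt rest (some b) w

def best_indices_py_alt (values : List (Option Int)) (direction : String) : List Int :=
  if direction == "none" then []
  else if direction == "boolean" then pvBoolLoop (PySem.List.enumerate values) []
  else if direction == "higher" then
    pvBestLoop (fun a b => decide (a > b)) (PySem.List.enumerate values) none []
  else if direction == "lower" then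
    pvBestLoop (fun a b => decide (a < b)) (PySem.List.enumerate values) none []
  else []

-- ===== PRECONDITION & SPEC =====
def Spec_best_indices_py (values : List (Option Int)) (direction : String) (out : List Int) : Prop := out = best_indices_py_alt values direction
instance (values : List (Option Int)) (direction : String) (out : List Int) : Decidable (Spec_best_indices_py values direction out) := by unfold Spec_best_indices_py; infer_instance

-- ===== CLAIM (what is proved, stated in full; the proofs are below) =====
def Claim_equal_best_indices_py : Prop := ∀ (values : List (Option Int)) (direction : String), Dom_best_indices_py values direction → Spec_best_indices_py values direction (best_indices_py values direction)

-- ===== LEMMAS AND PROOFS =====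

-- the non-None (index, value) pairs of a (already enumerated) list
def pvNN (l : List (Int × Option Int)) : List (Int × Int) :=
  l.filterMap (fun p => p.2.map (fun x => (p.1, x)))

theorem pvNN_cons_none (i : Int) (rest : List (Int × Option Int)) :
    pvNN ((i, none) :: rest) = pvNN rest := rfl
theorem pvNN_cons_some (i x : Int) (rest : List (Int × Option Int)) :
    pvNN ((i, some x) :: rest) = (i, x) :: pvNN rest := rfl

theorem pvBoolLoop_eq (l : List (Int × Option Int)) (acc : List Int) :
    pvBoolLoop l acc = acc ++ ((pvNN l).filter (fun p => p.2 != 0)).map (fun p => p.1) := by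
  induction l generalizing acc with
  | nil => simp [pvBoolLoop, pvNN]
  | cons hd rest ih =>
    obtain ⟨i, v⟩ := hd
    cases v with
    | none => simpa [pvBoolLoop, pvNN_cons_none] using ih acc
    | some x =>
      by_cases hx : x = 0
      · simp [pvBoolLoop, hx, pvNN_cons_some, ih]
      · simp [pvBoolLoop, hx, pvNN_cons_some, ih]

theorem pvBestLoop_max (l : List (Int × Option Int)) (b : Int) (w : List Int) :
    pvBestLoop (fun a b => decide (a > b)) l (some b) w =
      (if b = ((pvNN l).map (fun p => p.2)).foldl max b then w else []) ++
        ((pvNN l).filter (fun p => p.2 == ((pvNN l).map (fun p => p.2)).foldl max b)).map (fun p => p.1) := by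
  induction l generalizing b w with
  | nil => simp [pvBestLoop, pvNN]
  | cons hd rest ih =>
    obtain ⟨i, v⟩ := hd
    cases v with
    | none => simpa [pvBestLoop, pvNN_cons_none] using ih b w
    | some x =>
      have hle := PySem.List.le_foldl_max ((pvNN rest).map (fun p => p.2))
      rcases lt_trichotomy b x with h | h | h
      · have hm : max b x = x := by omega
        simp only [pvBestLoop, pvNN_cons_some, List.map_cons, List.foldl_cons, hm,
          decide_eq_true_eq, if_pos h]
        rw [ih x [i]]
        set m := ((pvNN rest).map (fun p => p.2)).foldl max x with hmdef
        have hb : b ≠ m := by have := (hle x).1; omega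
        by_cases hx : x = m
        · simp [List.filter_cons, hx, hb]
        · simp [List.filter_cons, hx, hb]
      · subst h
        have hm : max b b = b := by omega
        simp only [pvBestLoop, pvNN_cons_some, List.map_cons, List.foldl_cons, hm,
          decide_eq_true_eq, if_neg (lt_irrefl b), beq_self_eq_true, if_pos rfl]
        rw [ih b (w ++ [i])]
        set m := ((pvNN rest).map (fun p => p.2)).foldl max b with hmdef
        by_cases hb : b = m
        · simp [List.filter_cons, ← hb]
        · simp [List.filter_cons, hb]
      · have hm : max b x = b := by omega
        simp only [pvBestLoop, pvNN_cons_some, List.map_cons, List.foldl_cons, hm,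
          decide_eq_true_eq]
        rw [if_neg (by omega)]
        set m := ((pvNN rest).map (fun p => p.2)).foldl max b with hmdef
        have hx : x ≠ m := by have := (hle b).1; omega
        rw [if_neg (by simp; omega)]
        rw [ih b w]
        simp [List.filter_cons, hx, ← hmdef]

theorem pvBestLoop_min (l : List (Int × Option Int)) (b : Int) (w : List Int) :
    pvBestLoop (fun a b => decide (a < b)) l (some b) w =
      (if b = ((pvNN l).map (fun p => p.2)).foldl min b then w else []) ++
        ((pvNN l).filter (fun p => p.2 == ((pvNN l).map (fun p => p.2)).foldl min b)).map (fun p => p.1) := by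
  induction l generalizing b w with
  | nil => simp [pvBestLoop, pvNN]
  | cons hd rest ih =>
    obtain ⟨i, v⟩ := hd
    cases v with
    | none => simpa [pvBestLoop, pvNN_cons_none] using ih b w
    | some x =>
      have hle := PySem.List.foldl_min_le ((pvNN rest).map (fun p => p.2))
      rcases lt_trichotomy x b with h | h | h
      · have hm : min b x = x := by omega
        simp only [pvBestLoop, pvNN_cons_some, List.map_cons, List.foldl_cons, hm,
          decide_eq_true_eq, if_pos h]
        rw [ih x [i]]
        set m := ((pvNN rest).map (fun p => p.2)).foldl min x with hmdef
        have hb : b ≠ m := by have := (hle x).1; omega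
        by_cases hx : x = m
        · simp [List.filter_cons, hx, hb]
        · simp [List.filter_cons, hx, hb]
      · subst h
        have hm : min x x = x := by omega
        simp only [pvBestLoop, pvNN_cons_some, List.map_cons, List.foldl_cons, hm,
          decide_eq_true_eq, if_neg (lt_irrefl x), beq_self_eq_true, if_pos rfl]
        rw [ih x (w ++ [i])]
        set m := ((pvNN rest).map (fun p => p.2)).foldl min x with hmdef
        by_cases hb : x = m
        · simp [List.filter_cons, ← hb]
        · simp [List.filter_cons, hb]
      · have hm : min b x = b := by omega
        simp only [pvBestLoop, pvNN_cons_some, List.map_cons, List.foldl_cons, hm,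
          decide_eq_true_eq]
        rw [if_neg (by omega)]
        set m := ((pvNN rest).map (fun p => p.2)).foldl min b with hmdef
        have hx : x ≠ m := by have := (hle b).1; omega
        rw [if_neg (by simp; omega)]
        rw [ih b w]
        simp [List.filter_cons, hx, ← hmdef]

theorem pvBestLoop_max_start (l : List (Int × Option Int)) :
    pvBestLoop (fun a b => decide (a > b)) l none [] =
      match PySem.List.max? ((pvNN l).map (fun p => p.2)) (fun y => y) with
      | some m => ((pvNN l).filter (fun p => p.2 == m)).map (fun p => p.1)
      | none => [] := by
  induction l with
  | nil => simp [pvBestLoop, pvNN, PySem.List.max?]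
  | cons hd rest ih =>
    obtain ⟨i, v⟩ := hd
    cases v with
    | none => simpa [pvBestLoop, pvNN_cons_none] using ih
    | some x =>
      simp only [pvBestLoop, pvNN_cons_some, List.map_cons]
      rw [PySem.List.max?_id_cons, pvBestLoop_max]
      set m := ((pvNN rest).map (fun p => p.2)).foldl max x with hmdef
      by_cases hb : x = m
      · simp [List.filter_cons, ← hb]
      · simp [List.filter_cons, hb]

theorem pvBestLoop_min_start (l : List (Int × Option Int)) :
    pvBestLoop (fun a b => decide (a < b)) l none [] =
      match PySem.List.min? ((pvNN l).map (fun p => p.2)) (fun y => y) with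
      | some m => ((pvNN l).filter (fun p => p.2 == m)).map (fun p => p.1)
      | none => [] := by
  induction l with
  | nil => simp [pvBestLoop, pvNN, PySem.List.min?]
  | cons hd rest ih =>
    obtain ⟨i, v⟩ := hd
    cases v with
    | none => simpa [pvBestLoop, pvNN_cons_none] using ih
    | some x =>
      simp only [pvBestLoop, pvNN_cons_some, List.map_cons]
      rw [PySem.List.min?_id_cons, pvBestLoop_min]
      set m := ((pvNN rest).map (fun p => p.2)).foldl min x with hmdef
      by_cases hb : x = m
      · simp [List.filter_cons, ← hb]
      · simp [List.filter_cons, hb]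

theorem pvNN_fold (l : List (Int × Option Int)) :
    l.filterMap (fun p => p.2.map (fun x => (p.1, x))) = pvNN l := rfl

-- ===== VERDICT (by name: the statement is the Claim_ definition above) =====
theorem best_indices_py_spec : Claim_equal_best_indices_py := by
  intro values direction _
  unfold Spec_best_indices_py best_indices_py best_indices_py_alt
  simp only [pvNN_fold]
  set l := PySem.List.enumerate values with hl
  by_cases h0 : direction = "none"
  · simp [h0]
  · by_cases h1 : direction = "boolean"
    · subst h1
      rw [pvBoolLoop_eq]
      by_cases he : (pvNN l).isEmpty
      · have h2 : pvNN l = [] := List.isEmpty_iff.mp he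
        simp [h2, he]
      · simp [he]
    · by_cases h2 : direction = "higher"
      · subst h2
        rw [pvBestLoop_max_start]
        by_cases he : (pvNN l).isEmpty
        · have h3 : pvNN l = [] := List.isEmpty_iff.mp he
          simp [he, h3, PySem.List.max?]
        · rcases hm : PySem.List.max? ((pvNN l).map (fun p => p.2)) (fun y => y) with _ | m
          · exfalso
            rw [PySem.List.max?_eq_none_iff, List.map_eq_nil_iff] at hm
            rw [List.isEmpty_iff] at he
            exact he hm
          · simp [he, hm]
      · by_cases h3 : direction = "lower"
        · subst h3
          rw [pvBestLoop_min_start]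
          by_cases he : (pvNN l).isEmpty
          · have h4 : pvNN l = [] := List.isEmpty_iff.mp he
            simp [he, h4, PySem.List.min?]
          · rcases hm : PySem.List.min? ((pvNN l).map (fun p => p.2)) (fun y => y) with _ | m
            · exfalso
              rw [PySem.List.min?_eq_none_iff, List.map_eq_nil_iff] at hm
              rw [List.isEmpty_iff] at he
              exact he hm
            · simp [he, hm]
        · simp [h0, h1, h2, h3]
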